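-- pv_equiv track=rewrite | github.com/jaime0299/compilador | optimizacion2.py | Eliminacion_de_Copeas
-- ===== SOURCE A (Python) =====
-- def Eliminacion_de_Copeas(Codigo):
--
--     ALL_CODE = []
--     Inicio = 1
--     Fin = 0
--     Con = 0
--     Op = ""
--     for i in Codigo:
--         A = []
--         if (i == 'Begin' or i == 'End'):
--             A.append(i)
--             ALL_CODE.append(A)
--         if (i == ';'):
--             Fin = Con + 1;
--         if (Inicio != 0 and Fin != 0):
--             Op = Codigo[Inicio:Fin]
--             ALL_CODE.append(Op)
--             Inicio = Fin
--             Fin = 0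
--         Con += 1
--
--     """
--     print ("-----------------------------------------------")
--     print ("Codigo Entrada")
--     print ("-----------------------------------------------")
--
--     for i in range(len(ALL_CODE)):
--         for j in range(len(ALL_CODE[i])):
--             print (ALL_CODE[i][j], end=" ")
--         print ("\n")
--     """
--
--     Lista_Operacion = []
--     Lista_Posiciones = []
--
--     con = 0
--     for i in ALL_CODE:
--         if ("=" in i and len(i) < 5):
--             Lista_Operacion.append(i[0:len(i)-1])
--             Lista_Posiciones.append(con)
--         con += 1
--
--     L_V = []
--     V_C = []
--     L_P = []
--     Var = []
--     c = 0
--     for i in range(len(Lista_Operacion)):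
--         try:
--             x = float(Lista_Operacion[c][2])
--             if(Lista_Operacion[c][0] not in L_V):
--                 L_V.append(Lista_Operacion[c][0])
--         except:
--             Var.append(Lista_Operacion[c][0])
--             V_C.append(Lista_Operacion[c][2])
--             L_P.append(Lista_Posiciones[c])
--         c += 1
--
--     Opreaciones = ['+','-','*','/']
--     c = 0
--     while (c < len(L_P)):
--         for i in range(len(ALL_CODE)):
--             if (i == L_P[c]):
--                 for x in range(i+1,len(ALL_CODE)):
--                     for y in range(len(ALL_CODE[x])):
--                         if (y > 1 and ALL_CODE[x][y] != ';' and ALL_CODE[x][y] not in Opreaciones and ALL_CODE[x][y] not in L_V):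
--                             if (Var[c] == ALL_CODE[x][y]):
--                                 ALL_CODE[x][y] = V_C[c]
--                 break
--
--         c += 1
--
--     Elimincacion = []
--     for i in range(len(ALL_CODE)):
--         if (i not in L_P):
--             Elimincacion.append(ALL_CODE[i])
--
--     return Elimincacion
--     """print ("-----------------------------------------------")
--     print ("Codigo Salida Optimizado")
--     print ("-----------------------------------------------")
--     for i in range(len(Elimincacion)):
--         for j in range(len(Elimincacion[i])):
--             print (Elimincacion[i][j], end=" ")
--         print ("\n")"""
-- ===== SOURCE B (Python) =====
-- # B: one-pointer block splitter, a single classification pass over the blocks,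
-- # and one forward rewrite pass that applies all copy substitutions in order
-- # and drops the copy blocks on the fly.
--
-- def Eliminacion_de_Copeas(Codigo):
--     # split into blocks: the ';'-terminated segments of Codigo[1:], with a
--     # singleton block inserted wherever a 'Begin'/'End' token occurs
--     blocks = []
--     start = 1
--     for pos, tok in enumerate(Codigo):
--         if tok in ('Begin', 'End'):
--             blocks.append([tok])
--         if tok == ';':
--             blocks.append(Codigo[start:pos + 1])
--             start = pos + 1
--
--     # classify the short assignment blocks in one pass:
--     # numeric right-hand sides register a constant name, the rest are copies
--     consts = []
--     copies = []          # (block position, lhs, rhs)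
--     for pos, blk in enumerate(blocks):
--         if '=' in blk and len(blk) < 5:
--             lhs, rhs = blk[0], blk[2]
--             try:
--                 float(rhs)
--                 if lhs not in consts:
--                     consts.append(lhs)
--             except ValueError:
--                 copies.append((pos, lhs, rhs))
--
--     # one forward pass: drop the copy blocks, rewrite every later occurrence
--     ops = ('+', '-', '*', '/')
--     drop = {p for p, _, _ in copies}
--     result = []
--     for pos, blk in enumerate(blocks):
--         if pos in drop:
--             continue
--         new = []
--         for y, tok in enumerate(blk):
--             for p, lhs, rhs in copies:
--                 if p < pos and y > 1 and tok != ';' and tok not in ops \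
--                         and tok not in consts and tok == lhs:
--                     tok = rhs
--             new.append(tok)
--         result.append(new)
--     return result
-- ===== Notes on version B (the rewrite author's own statement) =====
-- stated objective: alternative
-- what changed: A's Inicio/Fin/Con state-machine splitter, two staged collect-then-classify passes, per-copy repeated forward scans over ALL_CODE and a separate final elimination pass are replaced by a one-pointer splitter, a single classification pass over the blocks, and one forward pass that applies all copy substitutions in order and drops the copy blocks on the fly; Pre_ excludes assignment blocks shorter than 4 tokens, on which A raises IndexError.
import Mathlib
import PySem

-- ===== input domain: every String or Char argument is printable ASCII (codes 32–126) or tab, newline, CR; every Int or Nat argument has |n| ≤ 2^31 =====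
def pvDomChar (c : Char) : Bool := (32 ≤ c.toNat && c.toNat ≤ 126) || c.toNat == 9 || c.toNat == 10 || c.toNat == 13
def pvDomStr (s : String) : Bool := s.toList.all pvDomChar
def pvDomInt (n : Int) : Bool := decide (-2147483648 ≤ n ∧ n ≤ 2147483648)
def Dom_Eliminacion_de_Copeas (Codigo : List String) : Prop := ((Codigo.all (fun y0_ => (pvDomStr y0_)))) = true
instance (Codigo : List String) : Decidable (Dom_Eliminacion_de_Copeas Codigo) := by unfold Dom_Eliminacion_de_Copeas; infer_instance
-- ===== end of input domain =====

-- B replaces A's Inicio/Fin/Con splitter state machine by a one-pointer splitter, A's two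
-- staged collect-then-classify passes by a single classification pass over the blocks, and
-- A's per-copy repeated suffix scans plus a separate elimination pass by one forward pass.

-- ===== SHARED HELPER (both Pythons test whether float(s) succeeds) =====

-- "float(s) succeeds" (a ValueError test), hand ported; exact on the stated ASCII domain
def pvWs (c : Char) : Bool :=
  c == ' ' || c == '\t' || c == '\n' || c == '\r' || c == '\x0b' || c == '\x0c'

def pvStrip (cs : List Char) : List Char :=
  ((cs.dropWhile pvWs).reverse.dropWhile pvWs).reverse

-- one or more ASCII digits, single underscores allowed between digits
def pvDigitPart (u : List Char) : Bool :=
  let r := u.foldl (fun (st : Bool × Char) ch =>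
    if ch == '_' then (st.1 && st.2.isDigit, ch) else (st.1 && ch.isDigit, ch)) (true, ' ')
  r.1 && !u.isEmpty && r.2 != '_'

-- split a char list at the first char satisfying p
def pvBreak (p : Char → Bool) : List Char → List Char × List Char
  | [] => ([], [])
  | c :: r => if p c then ([], c :: r) else
      let q := pvBreak p r
      (c :: q.1, q.2)

def pvIsFloatChars (cs : List Char) : Bool :=
  let t0 := pvStrip cs
  let t := match t0 with
           | c :: r => if c == '+' || c == '-' then r else t0
           | [] => t0
  let lo := PySem.Chars.lower t
  if lo == "inf".toList || lo == "infinity".toList || lo == "nan".toList then true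
  else
    -- split at the first 'e'/'E'
    let me := pvBreak (fun c => c == 'e' || c == 'E') t
    let expOk : Bool :=
      match me.2 with
      | [] => true
      | _ :: ex0 =>
        let ex := match ex0 with
                  | c :: r => if c == '+' || c == '-' then r else ex0
                  | [] => ex0
        pvDigitPart ex
    if !expOk then false
    else
      -- split the mantissa at the first '.'
      let ab := pvBreak (fun c => c == '.') me.1
      match ab.2 with
      | [] => pvDigitPart me.1
      | _ :: b =>
        if ab.1 == ([] : List Char) && b == ([] : List Char) then false
        else (ab.1 == ([] : List Char) || pvDigitPart ab.1) &&
             (b == ([] : List Char) || pvDigitPart b)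

def pvIsFloat (s : String) : Bool := pvIsFloatChars s.toList

-- ===== PORT A =====

-- A's first loop: the Inicio/Fin/Con state machine over the raw token list
def pvParseStep (Codigo : List String) (st : List (List String) × Int × Int × Int) (i : String) :
    List (List String) × Int × Int × Int :=
  let AC := if i == "Begin" || i == "End" then st.1 ++ [[i]] else st.1
  let Inicio := st.2.1
  let Fin := if i == ";" then st.2.2.2 + 1 else st.2.2.1
  let Con := st.2.2.2
  if Inicio ≠ 0 ∧ Fin ≠ 0 then
    (AC ++ [PySem.List.slice Codigo (some Inicio) (some Fin)], Fin, 0, Con + 1)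
  else (AC, Inicio, Fin, Con + 1)

def pvParse (Codigo : List String) : List (List String) :=
  (Codigo.foldl (pvParseStep Codigo) ([], 1, 0, 0)).1

-- A's second loop: collect the short '='-operations and their positions
def pvPhase2Step (st : List (List String) × List Int × Int) (i : List String) :
    List (List String) × List Int × Int :=
  if i.contains "=" && decide (i.length < 5) then
    (st.1 ++ [PySem.List.slice i (some 0) (some ((i.length : Int) - 1))],
     st.2.1 ++ [st.2.2], st.2.2 + 1)
  else (st.1, st.2.1, st.2.2 + 1)

def pvPhase2 (ALL : List (List String)) : List (List String) × List Int :=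
  let r := ALL.foldl pvPhase2Step ([], [], 0)
  (r.1, r.2.1)

def pvOps : List String := ["+", "-", "*", "/"]

-- A's guarded token rewrite (y > 1, tok != ';', not an operator, not a constant name,
-- equal to the copied variable); `Var[c] == tok` is the same String test
def pvSubstTok (L_V : List String) (v w : String) (y : Nat) (tok : String) : String :=
  if decide (1 < y) && tok != ";" && !(pvOps.contains tok) && !(L_V.contains tok) then
    if v == tok then w else tok
  else tok

-- phase 3 of A: loop over range(len(Lista_Operacion)); A's counter c always equals the loop
-- index, so the loop index is used for c.  In the `none` branch Python raises IndexError
-- (op[2] inside the except-handler); excluded by Pre_, the stand-in appends defaults.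
def pvPhase3AStep (LO : List (List String)) (LPos : List Int)
    (st : List String × List String × List String × List Int) (c : Int) :
    List String × List String × List String × List Int :=
  let op := PySem.List.pyGetD LO c []
  match PySem.List.pyGet? op 2 with
  | some s =>
    if pvIsFloat s then
      if !(st.1.contains (PySem.List.pyGetD op 0 "")) then
        (st.1 ++ [PySem.List.pyGetD op 0 ""], st.2.1, st.2.2.1, st.2.2.2)
      else st
    else
      (st.1, st.2.1 ++ [PySem.List.pyGetD op 0 ""], st.2.2.1 ++ [s],
       st.2.2.2 ++ [PySem.List.pyGetD LPos c 0])
  | none =>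
      (st.1, st.2.1 ++ [PySem.List.pyGetD op 0 ""], st.2.2.1 ++ [""],
       st.2.2.2 ++ [PySem.List.pyGetD LPos c 0])

-- one step of A's phase-4 while loop: scan for the copy's block index (the for/break), then
-- rewrite every later block in place (the y-loop writes each position exactly once)
def pvA4Step (L_V Var V_C : List String) (L_P : List Int)
    (AC : List (List String)) (c : Int) : List (List String) :=
  match (List.range AC.length).find? (fun (i : Nat) => (i : Int) == PySem.List.pyGetD L_P c 0) with
  | none => AC
  | some i =>
    (PySem.List.pyRange ((i : Int) + 1) (AC.length : Int) 1).foldl (fun AC' x =>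
      AC'.modify x.toNat (fun blk => blk.mapIdx (fun y tok =>
        pvSubstTok L_V (PySem.List.pyGetD Var c "") (PySem.List.pyGetD V_C c "") y tok))) AC

def Eliminacion_de_Copeas (Codigo : List String) : List (List String) :=
  let ALL := pvParse Codigo
  let P2 := pvPhase2 ALL
  let Q := (PySem.List.pyRange 0 (P2.1.length : Int) 1).foldl (pvPhase3AStep P2.1 P2.2)
             ([], [], [], [])
  let AC2 := (PySem.List.pyRange 0 (Q.2.2.2.length : Int) 1).foldl
               (pvA4Step Q.1 Q.2.1 Q.2.2.1 Q.2.2.2) ALL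
  -- final elimination pass: keep the blocks whose index is not a copy position
  (PySem.List.pyRange 0 (AC2.length : Int) 1).foldl (fun out i =>
    if !(Q.2.2.2.contains i) then out ++ [PySem.List.pyGetD AC2 i []] else out) []

-- ===== PORT B =====

-- Source B's splitter: one moving start pointer over the indexed token stream
def bSplitStep (Codigo : List String) (st : List (List String) × Int) (p : Int × String) :
    List (List String) × Int :=
  let bl := if p.2 == "Begin" || p.2 == "End" then st.1 ++ [[p.2]] else st.1
  if p.2 == ";" then
    (bl ++ [PySem.List.slice Codigo (some st.2) (some (p.1 + 1))], p.1 + 1)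
  else (bl, st.2)

-- Source B's single classification pass over the indexed blocks, building the consts list and
-- the (position, lhs, rhs) copy triples directly; the `none` branch is Python's IndexError
-- on blk[2] (outside Pre_), the stand-in skips
def bClassifyStep (st : List String × List (Int × String × String))
    (p : Int × List String) : List String × List (Int × String × String) :=
  if p.2.contains "=" && decide (p.2.length < 5) then
    match PySem.List.pyGet? p.2 2 with
    | some rhs =>
      if pvIsFloat rhs then
        if !(st.1.contains (PySem.List.pyGetD p.2 0 "")) then
          (st.1 ++ [PySem.List.pyGetD p.2 0 ""], st.2)
        else st
      else (st.1, st.2 ++ [(p.1, PySem.List.pyGetD p.2 0 "", rhs)])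
    | none => st
  else st

-- Source B's one-shot guard: p < pos and y > 1 and tok != ';' and tok not in ops and
-- tok not in consts and tok == lhs
def bSubstTok (consts : List String) (pos q : Int) (v w : String) (y : Int) (tok : String) :
    String :=
  if decide (q < pos) && decide (1 < y) && tok != ";" && !(pvOps.contains tok) &&
     !(consts.contains tok) && tok == v then w else tok

def Eliminacion_de_Copeas_alt (Codigo : List String) : List (List String) :=
  let blocks := ((PySem.List.enumerate Codigo 0).foldl (bSplitStep Codigo) ([], 1)).1
  let C := (PySem.List.enumerate blocks 0).foldl bClassifyStep ([], [])
  let drop := PySem.Set.ofList (C.2.map (·.1))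
  -- one forward pass: skip the copy blocks, thread every copy through each token in order
  (PySem.List.enumerate blocks 0).foldl (fun result pb =>
    if PySem.Set.contains drop pb.1 then result
    else result ++ [(PySem.List.enumerate pb.2 0).foldl (fun new yt =>
      new ++ [C.2.foldl (fun tok s =>
        bSubstTok C.1 pb.1 s.1 s.2.1 s.2.2 yt.1 tok) yt.2]) []]) []

-- ===== PRECONDITION & SPEC =====

-- the inclusive-';' segments of Codigo[1:] (the blocks A slices out of the token stream)
def pvSegs (acc : List String) : List String → List (List String)
  | [] => []
  | t :: r => if t == ";" then (acc ++ [t]) :: pvSegs [] r else pvSegs (acc ++ [t]) r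

-- Pre_ excludes exactly the inputs on which A raises IndexError: a block that contains '='
-- but has fewer than 4 tokens makes A's except-handler evaluate op[2], which does not exist.
def Pre_Eliminacion_de_Copeas (Codigo : List String) : Prop :=
  ∀ s ∈ pvSegs [] Codigo.tail, "=" ∈ s → s.length ≠ 2 ∧ s.length ≠ 3

instance (Codigo : List String) : Decidable (Pre_Eliminacion_de_Copeas Codigo) := by
  unfold Pre_Eliminacion_de_Copeas; infer_instance

def pvWitness_Eliminacion_de_Copeas : List String :=
  ["Begin", "x", "=", "5", ";", "y", "=", "x", ";", "z", "=", "y", "+", "x", ";", "End"]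

def Spec_Eliminacion_de_Copeas (Codigo : List String) (out : List (List String)) : Prop :=
  out = Eliminacion_de_Copeas_alt Codigo
instance (Codigo : List String) (out : List (List String)) :
    Decidable (Spec_Eliminacion_de_Copeas Codigo out) := by
  unfold Spec_Eliminacion_de_Copeas; infer_instance

-- ===== CLAIM (what is proved, stated in full; the proofs are below) =====
def Claim_equal_Eliminacion_de_Copeas : Prop :=
  ∀ (Codigo : List String), Dom_Eliminacion_de_Copeas Codigo →
    Pre_Eliminacion_de_Copeas Codigo →
    Spec_Eliminacion_de_Copeas Codigo (Eliminacion_de_Copeas Codigo)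

-- ===== LEMMAS AND PROOFS =====

-- --- proof-side normal forms shared by both directions ---

-- A's phase 3 rewritten as a fold over the zipped (operation, position) pairs
def pvClassifyStep (st : List String × List String × List String × List Int)
    (p : List String × Int) : List String × List String × List String × List Int :=
  match PySem.List.pyGet? p.1 2 with
  | some s =>
    if pvIsFloat s then
      if !(st.1.contains (PySem.List.pyGetD p.1 0 "")) then
        (st.1 ++ [PySem.List.pyGetD p.1 0 ""], st.2.1, st.2.2.1, st.2.2.2)
      else st
    else
      (st.1, st.2.1 ++ [PySem.List.pyGetD p.1 0 ""], st.2.2.1 ++ [s], st.2.2.2 ++ [p.2])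
  | none => st

-- A's phase-2 filter, as an Option-valued guard on an indexed block
def pvGuard (p : Int × List String) : Option (List String × Int) :=
  if p.2.contains "=" && decide (p.2.length < 5) then
    some (PySem.List.slice p.2 (some 0) (some ((p.2.length : Int) - 1)), p.1)
  else none

def pvRw (L_V : List String) (v w : String) (blk : List String) : List String :=
  blk.mapIdx (pvSubstTok L_V v w)

def pvFinal (L_V : List String) (subs : List (Int × String × String)) (p : Int)
    (blk : List String) : List String :=
  blk.mapIdx (fun y tok => subs.foldl (fun t s =>
    if s.1 < p then pvSubstTok L_V s.2.1 s.2.2 y t else t) tok)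

def pvA4Core (L_V : List String) (AC : List (List String)) (s : Int × String × String) :
    List (List String) :=
  match (List.range AC.length).find? (fun (i : Nat) => (i : Int) == s.1) with
  | none => AC
  | some i =>
    (PySem.List.pyRange ((i : Int) + 1) (AC.length : Int) 1).foldl (fun AC' x =>
      AC'.modify x.toNat (pvRw L_V s.2.1 s.2.2)) AC

lemma pv_mapIdx_id {α : Type} (l : List α) : l.mapIdx (fun _ a => a) = l := by
  apply List.ext_getElem <;> simp

lemma pv_foldl_modify {α : Type} (f : α → α) :
    ∀ (r : List Nat) (l : List α), r.Nodup →
      r.foldl (fun l x => l.modify x f) l = l.mapIdx (fun j b => if j ∈ r then f b else b) := by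
  intro r
  induction r with
  | nil => intro l _; simp [pv_mapIdx_id]
  | cons k r' ih =>
    intro l hnd
    have hk : k ∉ r' := (List.nodup_cons.mp hnd).1
    have hr' : r'.Nodup := (List.nodup_cons.mp hnd).2
    simp only [List.foldl_cons]
    rw [ih _ hr']
    apply List.ext_getElem
    · simp
    · intro j h1 h2
      rw [List.getElem_mapIdx, List.getElem_mapIdx]
      have hj : j < l.length := by simpa using h2
      rw [List.getElem_modify]
      by_cases hjk : k = j
      · subst hjk
        simp [hk]
      · have : (j ∈ k :: r') ↔ (j ∈ r') := by
          simp [List.mem_cons]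
          intro h; exact absurd h.symm hjk
        simp only [if_neg hjk]
        by_cases hm : j ∈ r' <;> simp [hm, this]

lemma pv_find_range (n : Nat) (q : Int) (h0 : 0 ≤ q) (h1 : q < (n : Int)) :
    (List.range n).find? (fun (i : Nat) => (i : Int) == q) = some q.toNat := by
  induction n with
  | zero => omega
  | succ m ih =>
    rw [List.range_succ, List.find?_append]
    by_cases hq : q < (m : Int)
    · rw [ih hq]; rfl
    · have hqm : q = (m : Int) := by omega
      have hnone : (List.range m).find? (fun (i : Nat) => (i : Int) == q) = none := by
        rw [List.find?_eq_none]
        intro x hx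
        simp only [beq_iff_eq]
        have := List.mem_range.mp hx
        omega
      rw [hnone]
      simp [hqm]

lemma pv_zipIdx_mapIdx {α β : Type} (F : Nat → α → β) (l : List α) :
    (l.mapIdx F).zipIdx = l.zipIdx.map (fun p => (F p.2 p.1, p.2)) := by
  apply List.ext_getElem
  · simp
  · intro j h1 h2
    simp [List.getElem_zipIdx, List.getElem_mapIdx]

lemma pv_final_cons (L_V : List String) (s : Int × String × String)
    (rest : List (Int × String × String)) (p : Int) (b : List String) :
    pvFinal L_V rest p (if s.1 < p then pvRw L_V s.2.1 s.2.2 b else b)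
      = pvFinal L_V (s :: rest) p b := by
  by_cases h : s.1 < p
  · simp only [pvFinal, pvRw, if_pos h, List.mapIdx_mapIdx, List.foldl_cons]
    rfl
  · simp only [pvFinal, if_neg h, List.foldl_cons]

lemma pv_A4Core_eq (L_V : List String) (AC : List (List String)) (s : Int × String × String)
    (h0 : 0 ≤ s.1) (h1 : s.1 < (AC.length : Int)) :
    pvA4Core L_V AC s
      = AC.mapIdx (fun x b => if s.1 < (x : Int) then pvRw L_V s.2.1 s.2.2 b else b) := by
  unfold pvA4Core
  rw [pv_find_range AC.length s.1 h0 h1]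
  simp only
  have hcast : ((s.1.toNat : Int)) + 1 = ((s.1.toNat + 1 : Nat) : Int) := by push_cast; ring
  rw [hcast, PySem.List.pyRange_one]
  rw [List.foldl_map]
  have hbody : (fun (l : List (List String)) (k : Nat) =>
      l.modify (((s.1.toNat + 1 : Nat) : Int) + (k : Int)).toNat (pvRw L_V s.2.1 s.2.2))
      = fun l k => l.modify (s.1.toNat + 1 + k) (pvRw L_V s.2.1 s.2.2) := by
    funext l k
    have h : (((s.1.toNat + 1 : Nat) : Int) + (k : Int)).toNat = s.1.toNat + 1 + k := by omega
    rw [h]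
  rw [hbody, ← List.foldl_map (f := fun k => s.1.toNat + 1 + k)
        (g := fun (l : List (List String)) x => l.modify x (pvRw L_V s.2.1 s.2.2))]
  rw [pv_foldl_modify _ _ _ (List.Nodup.map (fun a b h => by omega) (List.nodup_range))]
  apply List.ext_getElem
  · simp
  · intro j hj1 hj2
    rw [List.getElem_mapIdx, List.getElem_mapIdx]
    have hmem : (j ∈ (List.range (((AC.length : Int)) - ((s.1.toNat + 1 : Nat) : Int)).toNat |>.map
        (fun k => s.1.toNat + 1 + k))) ↔ (s.1 < (j : Int)) := by
      simp only [List.mem_map, List.mem_range]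
      constructor
      · rintro ⟨k, hk, rfl⟩; omega
      · intro h
        refine ⟨j - (s.1.toNat + 1), by simp at hj1; omega, by omega⟩
    by_cases hc : s.1 < (j : Int)
    · rw [if_pos (hmem.mpr hc), if_pos hc]
    · rw [if_neg (fun h => hc (hmem.mp h)), if_neg hc]

lemma pv_A4_fold (L_V : List String) (n : Nat) :
    ∀ (subs : List (Int × String × String)) (AC : List (List String)),
      AC.length = n → (∀ s ∈ subs, 0 ≤ s.1 ∧ s.1 < (n : Int)) →
      subs.foldl (pvA4Core L_V) AC = AC.mapIdx (fun p b => pvFinal L_V subs (p : Int) b) := by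
  intro subs
  induction subs with
  | nil =>
    intro AC _ _
    simp only [List.foldl_nil, pvFinal, List.foldl_nil]
    have h : (fun (p : Nat) (b : List String) => List.mapIdx (fun (_ : Nat) (tok : String) => tok) b)
        = fun _ b => b := by
      funext p b; exact pv_mapIdx_id b
    rw [h]
    exact (pv_mapIdx_id AC).symm
  | cons s rest ih =>
    intro AC hlen hs
    simp only [List.foldl_cons]
    rw [pv_A4Core_eq L_V AC s (hs s (by simp)).1 (by rw [hlen]; exact (hs s (by simp)).2)]
    rw [ih _ (by simp [hlen]) (fun t ht => hs t (by simp [ht]))]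
    rw [List.mapIdx_mapIdx]
    congr 1
    funext p b
    exact pv_final_cons L_V s rest (p : Int) b

lemma pvSegs_semi (acc r : List String) :
    pvSegs acc (";" :: r) = (acc ++ [";"]) :: pvSegs [] r := by simp [pvSegs]

lemma pvSegs_other (acc : List String) (t : String) (r : List String) (ht : t ≠ ";") :
    pvSegs acc (t :: r) = pvSegs (acc ++ [t]) r := by simp [pvSegs, ht]

lemma pv_segs_getLast : ∀ (r acc : List String) (s : List String),
    s ∈ pvSegs acc r → s.getLast? = some ";" := by
  intro r
  induction r with
  | nil => intro acc s h; simp [pvSegs] at h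
  | cons t r' ih =>
    intro acc s h
    by_cases ht : t = ";"
    · subst ht
      rw [pvSegs_semi] at h
      rcases List.mem_cons.mp h with h | h
      · subst h; exact List.getLast?_concat
      · exact ih [] s h
    · rw [pvSegs_other acc t r' ht] at h
      exact ih (acc ++ [t]) s h

lemma pv_slice_snoc (C : List String) (a c : Nat) (t : String) (rest : List String)
    (hac : a ≤ c) (hd : C.drop c = t :: rest) :
    PySem.List.slice C (some (a : Int)) (some ((c : Int) + 1))
      = PySem.List.slice C (some (a : Int)) (some (c : Int)) ++ [t] := by
  have hcast : ((c : Int)) + 1 = ((c + 1 : Nat) : Int) := by push_cast; ring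
  rw [hcast, PySem.List.slice_natCast, PySem.List.slice_natCast]
  have h1 : c + 1 - a = (c - a) + 1 := by omega
  rw [h1, List.take_add_one]
  have h2 : (C.drop a)[c - a]? = some t := by
    rw [List.getElem?_drop]
    have h3 : a + (c - a) = c := by omega
    rw [h3]
    have h4 : (C.drop c)[0]? = some t := by rw [hd]; rfl
    rw [List.getElem?_drop] at h4
    simpa using h4
  rw [h2]
  rfl

lemma pv_parse_inv (C : List String) :
    ∀ (rest : List String) (AC : List (List String)) (a c : Nat),
      1 ≤ a → a ≤ c → C.drop c = rest →
      ∀ blk ∈ (rest.foldl (pvParseStep C) (AC, (a : Int), 0, (c : Int))).1,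
        blk ∈ AC ∨ ¬ "=" ∈ blk ∨
          blk ∈ pvSegs (PySem.List.slice C (some (a : Int)) (some (c : Int))) rest := by
  intro rest
  induction rest with
  | nil =>
    intro AC a c _ _ _ blk hm
    simp only [List.foldl_nil] at hm
    exact Or.inl hm
  | cons t r' ih =>
    intro AC a c ha hac hd blk hm
    simp only [List.foldl_cons] at hm
    have hdrop : C.drop (c + 1) = r' := by
      have h5 : List.drop 1 (C.drop c) = C.drop (c + 1) := by rw [List.drop_drop]
      rw [← h5, hd]; rfl
    have hc1 : ((c : Int)) + 1 = (((c + 1 : Nat)) : Int) := by push_cast; ring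
    by_cases ht : t = ";"
    · subst ht
      have hstep : pvParseStep C (AC, (a : Int), 0, (c : Int)) ";"
          = (AC ++ [PySem.List.slice C (some (a : Int)) (some ((c : Int) + 1))],
             (c : Int) + 1, 0, (c : Int) + 1) := by
        unfold pvParseStep
        simp only [show ((";" : String) == "Begin" || (";" : String) == "End") = false by decide,
          show ((";" : String) == ";") = true by decide, Bool.false_eq_true, if_false, if_true]
        rw [if_pos ⟨by omega, by omega⟩]
      rw [hstep, hc1] at hm
      have hih := ih (AC ++ [PySem.List.slice C (some (a : Int)) (some ((c : Int) + 1))])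
        (c + 1) (c + 1) (by omega) (le_refl _) hdrop blk (by rw [hc1]; exact hm)
      have hacc0 : PySem.List.slice C (some ((c + 1 : Nat) : Int)) (some ((c + 1 : Nat) : Int))
          = [] := by rw [PySem.List.slice_natCast]; simp
      rcases hih with h | h | h
      · rcases List.mem_append.mp h with h | h
        · exact Or.inl h
        · right; right
          have hb : blk = PySem.List.slice C (some (a : Int)) (some ((c : Int) + 1)) := by
            simpa using h
          rw [hb, pv_slice_snoc C a c ";" r' hac hd, pvSegs_semi]
          exact List.mem_cons_self
      · exact Or.inr (Or.inl h)
      · right; right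
        rw [pvSegs_semi]
        rw [hacc0] at h
        exact List.mem_cons_of_mem _ h
    · -- t is not ';'
      have hbeq : (t == ";") = false := by simpa using ht
      have hstep : pvParseStep C (AC, (a : Int), 0, (c : Int)) t
          = ((if t == "Begin" || t == "End" then AC ++ [[t]] else AC),
             (a : Int), 0, (c : Int) + 1) := by
        unfold pvParseStep
        simp only [hbeq, Bool.false_eq_true, if_false]
        rw [if_neg (fun h => h.2 rfl)]
      rw [hstep, hc1] at hm
      have hih := ih _ a (c + 1) ha (by omega) hdrop blk hm
      have haccs : PySem.List.slice C (some (a : Int)) (some ((c + 1 : Nat) : Int))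
          = PySem.List.slice C (some (a : Int)) (some (c : Int)) ++ [t] := by
        rw [← hc1]; exact pv_slice_snoc C a c t r' hac hd
      rcases hih with h | h | h
      · by_cases hbe : (t == "Begin" || t == "End") = true
        · rw [if_pos hbe] at h
          rcases List.mem_append.mp h with h | h
          · exact Or.inl h
          · right; left
            have hb : blk = [t] := by simpa using h
            subst hb
            intro hin
            have heq : "=" = t := by simpa using hin
            rcases Bool.or_eq_true_iff.mp hbe with h' | h'
            · have ht' : t = "Begin" := by simpa using h'
              rw [ht'] at heq; exact absurd heq (by decide)
            · have ht' : t = "End" := by simpa using h'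
              rw [ht'] at heq; exact absurd heq (by decide)
        · rw [if_neg hbe] at h
          exact Or.inl h
      · exact Or.inr (Or.inl h)
      · right; right
        rw [pvSegs_other _ t _ ht, ← haccs]
        exact h

lemma pv_parse_mem (C : List String) (blk : List String)
    (hm : blk ∈ pvParse C) (he : "=" ∈ blk) : blk ∈ pvSegs [] C.tail := by
  unfold pvParse at hm
  cases C with
  | nil => simp at hm
  | cons t0 rest =>
    simp only [List.foldl_cons] at hm
    have hslice11 : PySem.List.slice (t0 :: rest) (some ((1 : Nat) : Int))
        (some ((1 : Nat) : Int)) = [] := by rw [PySem.List.slice_natCast]; simp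
    have hAC0 : ∀ b ∈ (if t0 == "Begin" || t0 == "End" then
        ([] : List (List String)) ++ [[t0]] else []), ¬ "=" ∈ b := by
      intro b hb
      by_cases hbe : (t0 == "Begin" || t0 == "End") = true
      · rw [if_pos hbe] at hb
        have hb' : b = [t0] := by simpa using hb
        subst hb'
        intro hin
        have heq : "=" = t0 := by simpa using hin
        rcases Bool.or_eq_true_iff.mp hbe with h' | h'
        · have ht' : t0 = "Begin" := by simpa using h'
          rw [ht'] at heq; exact absurd heq (by decide)
        · have ht' : t0 = "End" := by simpa using h'
          rw [ht'] at heq; exact absurd heq (by decide)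
      · rw [if_neg hbe] at hb
        simp at hb
    by_cases ht : t0 = ";"
    · subst ht
      have hstep : pvParseStep (";" :: rest) (([] : List (List String)), (1 : Int), 0, (0 : Int)) ";"
          = ((if (";" : String) == "Begin" || (";" : String) == "End" then
               ([] : List (List String)) ++ [[";"]] else [])
               ++ [PySem.List.slice (";" :: rest) (some (1 : Int)) (some (1 : Int))],
             (1 : Int), 0, (1 : Int)) := by
        unfold pvParseStep
        simp only [show ((";" : String) == ";") = true by decide, if_true]
        rw [if_pos ⟨by omega, by omega⟩]
        norm_num
      rw [hstep] at hm
      have hih := pv_parse_inv (";" :: rest) rest _ 1 1 (le_refl _) (le_refl _) (by simp)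
        blk (by exact_mod_cast hm)
      rcases hih with h | h | h
      · rcases List.mem_append.mp h with h | h
        · exact absurd he (hAC0 blk h)
        · have hb : blk = PySem.List.slice (";" :: rest) (some ((1:Nat) : Int)) (some ((1:Nat) : Int)) := by
            simpa using h
          rw [hslice11] at hb
          subst hb; simp at he
      · exact absurd he h
      · rw [hslice11] at h
        simpa using h
    · have hbeq : (t0 == ";") = false := by simpa using ht
      have hstep : pvParseStep (t0 :: rest) (([] : List (List String)), (1 : Int), 0, (0 : Int)) t0
          = ((if t0 == "Begin" || t0 == "End" then ([] : List (List String)) ++ [[t0]] else []),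
             (1 : Int), 0, (1 : Int)) := by
        unfold pvParseStep
        simp only [hbeq, Bool.false_eq_true, if_false]
        rw [if_neg (fun h => h.2 rfl)]
        norm_num
      rw [hstep] at hm
      have hih := pv_parse_inv (t0 :: rest) rest _ 1 1 (le_refl _) (le_refl _) (by simp)
        blk (by exact_mod_cast hm)
      rcases hih with h | h | h
      · exact absurd he (hAC0 blk h)
      · exact absurd he h
      · rw [hslice11] at h
        simpa using h

-- under Pre_, every '='-containing short block the splitter produces has exactly 4 tokens
lemma pv_blk_len4 (C : List String) (hpre : Pre_Eliminacion_de_Copeas C) :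
    ∀ blk ∈ pvParse C, (blk.contains "=" && decide (blk.length < 5)) = true →
      blk.length = 4 := by
  intro blk hblk hg
  obtain ⟨h1, h2⟩ := Bool.and_eq_true_iff.mp hg
  have he : "=" ∈ blk := by simpa using h1
  have h5 : blk.length < 5 := of_decide_eq_true h2
  have hsegs := pv_parse_mem C blk hblk he
  have hlast := pv_segs_getLast C.tail [] blk hsegs
  have hpre' := hpre blk hsegs he
  have hne : blk ≠ [] := by
    intro h; rw [h] at hlast; simp at hlast
  have hlen1 : blk.length ≠ 1 := by
    intro hl1
    rcases List.length_eq_one_iff.mp hl1 with ⟨x, hx⟩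
    rw [hx] at hlast he
    have : x = ";" := by simpa using hlast
    rw [this] at he
    simp at he
  have h0 : blk.length ≠ 0 := by simpa using hne
  omega

lemma pv_phase2_fold :
    ∀ (l : List (List String)) (LO : List (List String)) (LPos : List Int) (c : Nat),
      LO.length = LPos.length →
      (l.foldl pvPhase2Step (LO, LPos, (c : Int))).1.length
          = (l.foldl pvPhase2Step (LO, LPos, (c : Int))).2.1.length ∧
      (∀ q ∈ (l.foldl pvPhase2Step (LO, LPos, (c : Int))).2.1,
          q ∈ LPos ∨ ((c : Int) ≤ q ∧ q < (c : Int) + l.length)) ∧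
      (∀ op ∈ (l.foldl pvPhase2Step (LO, LPos, (c : Int))).1,
          op ∈ LO ∨ ∃ blk ∈ l, blk.contains "=" ∧ blk.length < 5 ∧
            op = PySem.List.slice blk (some 0) (some ((blk.length : Int) - 1))) := by
  intro l
  induction l with
  | nil =>
    intro LO LPos c hlen
    refine ⟨hlen, ?_, ?_⟩
    · intro q hq; simp only [List.foldl_nil] at hq; exact Or.inl hq
    · intro op hop; simp only [List.foldl_nil] at hop; exact Or.inl hop
  | cons b r ih =>
    intro LO LPos c hlen
    simp only [List.foldl_cons]
    have hc1 : ((c : Int)) + 1 = (((c + 1 : Nat)) : Int) := by push_cast; ring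
    by_cases hg : (b.contains "=" && decide (b.length < 5)) = true
    · have hstep : pvPhase2Step (LO, LPos, (c : Int)) b
          = (LO ++ [PySem.List.slice b (some 0) (some ((b.length : Int) - 1))],
             LPos ++ [(c : Int)], (c : Int) + 1) := by
        unfold pvPhase2Step; rw [if_pos hg]
      rw [hstep, hc1]
      have hih := ih (LO ++ [PySem.List.slice b (some 0) (some ((b.length : Int) - 1))])
        (LPos ++ [(c : Int)]) (c + 1) (by simp [hlen])
      refine ⟨hih.1, ?_, ?_⟩
      · intro q hq
        rcases hih.2.1 q hq with h | h
        · rcases List.mem_append.mp h with h | h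
          · exact Or.inl h
          · right
            have : q = (c : Int) := by simpa using h
            subst this
            refine ⟨le_refl _, ?_⟩
            simp only [List.length_cons]
            push_cast
            omega
        · right
          simp only [List.length_cons] at h ⊢
          push_cast at h ⊢
          omega
      · intro op hop
        rcases hih.2.2 op hop with h | h
        · rcases List.mem_append.mp h with h | h
          · exact Or.inl h
          · right
            refine ⟨b, by simp, ?_, ?_, by simpa using h⟩
            · exact (Bool.and_eq_true_iff.mp hg).1
            · exact of_decide_eq_true (Bool.and_eq_true_iff.mp hg).2
        · rcases h with ⟨blk, hblk, h1, h2, h3⟩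
          exact Or.inr ⟨blk, by simp [hblk], h1, h2, h3⟩
    · have hstep : pvPhase2Step (LO, LPos, (c : Int)) b = (LO, LPos, (c : Int) + 1) := by
        unfold pvPhase2Step; rw [if_neg hg]
      rw [hstep, hc1]
      have hih := ih LO LPos (c + 1) hlen
      refine ⟨hih.1, ?_, ?_⟩
      · intro q hq
        rcases hih.2.1 q hq with h | h
        · exact Or.inl h
        · right
          simp only [List.length_cons] at h ⊢
          push_cast at h ⊢
          omega
      · intro op hop
        rcases hih.2.2 op hop with h | h
        · exact Or.inl h
        · rcases h with ⟨blk, hblk, h1, h2, h3⟩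
          exact Or.inr ⟨blk, by simp [hblk], h1, h2, h3⟩

lemma pv_phase2_len (ALL : List (List String)) :
    (pvPhase2 ALL).1.length = (pvPhase2 ALL).2.length := by
  have := (pv_phase2_fold ALL [] [] 0 rfl).1
  simpa [pvPhase2] using this

lemma pv_LPos_bounds (ALL : List (List String)) :
    ∀ q ∈ (pvPhase2 ALL).2, 0 ≤ q ∧ q < (ALL.length : Int) := by
  intro q hq
  have := (pv_phase2_fold ALL [] [] 0 rfl).2.1 q (by simpa [pvPhase2] using hq)
  rcases this with h | h
  · simp at h
  · push_cast at h; constructor <;> omega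

lemma pv_LO_len (C : List String) (hpre : Pre_Eliminacion_de_Copeas C) :
    ∀ op ∈ (pvPhase2 (pvParse C)).1, op.length = 3 := by
  intro op hop
  have := (pv_phase2_fold (pvParse C) [] [] 0 rfl).2.2 op (by simpa [pvPhase2] using hop)
  rcases this with h | h
  · simp at h
  · rcases h with ⟨blk, hblk, h1, h2, h3⟩
    have hlen4 : blk.length = 4 :=
      pv_blk_len4 C hpre blk hblk (by rw [Bool.and_eq_true_iff]; exact ⟨h1, decide_eq_true h2⟩)
    rw [h3]
    rw [show ((blk.length : Int)) - 1 = ((3 : Nat) : Int) by rw [hlen4]; norm_num]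
    rw [show (0 : Int) = ((0 : Nat) : Int) by norm_num, PySem.List.slice_natCast]
    simp [hlen4]

lemma pv_getD_zip {α β : Type} (l1 : List α) (l2 : List β) (c : Int) (d1 : α) (d2 : β)
    (hlen : l1.length = l2.length) (h0 : 0 ≤ c) (h1 : c < (l1.length : Int)) :
    PySem.List.pyGetD l1 c d1 = (PySem.List.pyGetD (l1.zip l2) c (d1, d2)).1 ∧
    PySem.List.pyGetD l2 c d2 = (PySem.List.pyGetD (l1.zip l2) c (d1, d2)).2 := by
  have hz : (l1.zip l2).length = l1.length := by simp [List.length_zip, hlen]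
  rw [PySem.List.pyGetD_eq_getElem l1 d1 h0 h1,
      PySem.List.pyGetD_eq_getElem l2 d2 h0 (by omega),
      PySem.List.pyGetD_eq_getElem (l1.zip l2) (d1, d2) h0 (by rw [hz]; exact h1)]
  rw [List.getElem_zip]
  exact ⟨rfl, rfl⟩

lemma pv_phase3_eq (LO : List (List String)) (LPos : List Int)
    (hop : ∀ op ∈ LO, op.length = 3) (hlen : LO.length = LPos.length)
    (init : List String × List String × List String × List Int) :
    (PySem.List.pyRange 0 (LO.length : Int) 1).foldl (pvPhase3AStep LO LPos) init
      = (LO.zip LPos).foldl pvClassifyStep init := by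
  have hzl : (LO.zip LPos).length = LO.length := by simp [List.length_zip, hlen]
  have hbound : ((LO.length : Int)) = (((LO.zip LPos).length : Int)) := by rw [hzl]
  rw [hbound]
  rw [PySem.List.foldl_congr_mem _ _
    (fun st c => pvClassifyStep st (PySem.List.pyGetD (LO.zip LPos) c ([], 0))) init ?_]
  · exact PySem.List.foldl_pyRange_zero_pyGetD' (LO.zip LPos) ([], 0) pvClassifyStep init
  · intro st c hc
    have hc' := PySem.List.mem_pyRange_one.mp hc
    have hc0 : 0 ≤ c := hc'.1
    have hc1 : c < (LO.length : Int) := by rw [← hbound] at hc'; exact hc'.2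
    obtain ⟨hz1, hz2⟩ := pv_getD_zip LO LPos c [] 0 hlen hc0 hc1
    have hopc : (PySem.List.pyGetD LO c []).length = 3 := by
      rw [PySem.List.pyGetD_eq_getElem LO [] hc0 hc1]
      exact hop _ (List.getElem_mem _)
    have hget : ∃ s, PySem.List.pyGet? (PySem.List.pyGetD LO c []) 2 = some s := by
      refine ⟨(PySem.List.pyGetD LO c [])[2]'(by omega), ?_⟩
      rw [show (2 : Int) = ((2 : Nat) : Int) by norm_num, PySem.List.pyGet?_natCast]
      exact List.getElem?_eq_getElem (by omega)
    obtain ⟨s, hs⟩ := hget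
    rw [hz1] at hs
    simp only [pvPhase3AStep, pvClassifyStep, hz1, hz2]
    rw [hs]

lemma pv_classify_inv (zl : List (List String × Int)) :
    ∀ (st : List String × List String × List String × List Int),
      st.2.1.length = st.2.2.1.length → st.2.1.length = st.2.2.2.length →
      ((zl.foldl pvClassifyStep st).2.1.length = (zl.foldl pvClassifyStep st).2.2.1.length ∧
       (zl.foldl pvClassifyStep st).2.1.length = (zl.foldl pvClassifyStep st).2.2.2.length) ∧
      (∀ q ∈ (zl.foldl pvClassifyStep st).2.2.2, q ∈ st.2.2.2 ∨ q ∈ zl.map (·.2)) := by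
  induction zl with
  | nil =>
    intro st h1 h2
    exact ⟨⟨h1, h2⟩, fun q hq => Or.inl hq⟩
  | cons p r ih =>
    intro st h1 h2
    simp only [List.foldl_cons]
    have key : ((pvClassifyStep st p).2.1.length = (pvClassifyStep st p).2.2.1.length ∧
                (pvClassifyStep st p).2.1.length = (pvClassifyStep st p).2.2.2.length) ∧
               ((pvClassifyStep st p).2.2.2 = st.2.2.2 ∨
                (pvClassifyStep st p).2.2.2 = st.2.2.2 ++ [p.2]) := by
      unfold pvClassifyStep
      cases PySem.List.pyGet? p.1 2 with
      | none => exact ⟨⟨h1, h2⟩, Or.inl rfl⟩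
      | some s =>
        dsimp only
        by_cases hf : pvIsFloat s = true
        · rw [if_pos hf]
          by_cases hc : (!st.1.contains (PySem.List.pyGetD p.1 0 "")) = true
          · rw [if_pos hc]; exact ⟨⟨h1, h2⟩, Or.inl rfl⟩
          · rw [if_neg hc]; exact ⟨⟨h1, h2⟩, Or.inl rfl⟩
        · rw [if_neg hf]
          refine ⟨⟨by simp [h1], by simp [h2]⟩, Or.inr rfl⟩
    have hih := ih (pvClassifyStep st p) key.1.1 key.1.2
    refine ⟨hih.1, ?_⟩
    intro q hq
    rcases hih.2 q hq with h | h
    · rcases key.2 with he | he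
      · rw [he] at h; exact Or.inl h
      · rw [he] at h
        rcases List.mem_append.mp h with h | h
        · exact Or.inl h
        · right; simp at h; simp [h]
    · right; simp [h]

-- --- bridging B's splitter to A's (the Fin flag is always 0 at loop entry) ---

lemma pv_split_inv (C : List String) :
    ∀ (l : List String) (c : Int) (AC : List (List String)) (a : Int), 1 ≤ a → 0 ≤ c →
      l.foldl (pvParseStep C) (AC, a, 0, c)
        = (((PySem.List.enumerate l c).foldl (bSplitStep C) (AC, a)).1,
           ((PySem.List.enumerate l c).foldl (bSplitStep C) (AC, a)).2,
           0, c + l.length) := by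
  intro l
  induction l with
  | nil =>
    intro c AC a _ _
    simp [PySem.List.enumerate]
  | cons t r ih =>
    intro c AC a ha hc
    rw [PySem.List.enumerate_cons]
    simp only [List.foldl_cons]
    by_cases ht : t = ";"
    · subst ht
      have hA : pvParseStep C (AC, a, 0, c) ";"
          = ((if (";" : String) == "Begin" || (";" : String) == "End" then AC ++ [[";"]] else AC)
              ++ [PySem.List.slice C (some a) (some (c + 1))],
             c + 1, 0, c + 1) := by
        unfold pvParseStep
        simp only [show ((";" : String) == ";") = true by decide, if_true]
        rw [if_pos ⟨by omega, by omega⟩]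
      have hB : bSplitStep C (AC, a) (c, ";")
          = ((if (";" : String) == "Begin" || (";" : String) == "End" then AC ++ [[";"]] else AC)
              ++ [PySem.List.slice C (some a) (some (c + 1))], c + 1) := by
        unfold bSplitStep
        simp only [show ((";" : String) == ";") = true by decide, if_true]
      rw [hA, hB]
      rw [ih (c + 1) _ _ (by omega) (by omega)]
      simp only [List.length_cons]
      push_cast
      ring_nf
    · have hbeq : (t == ";") = false := by simpa using ht
      have hA : pvParseStep C (AC, a, 0, c) t
          = ((if t == "Begin" || t == "End" then AC ++ [[t]] else AC), a, 0, c + 1) := by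
        unfold pvParseStep
        simp only [hbeq, Bool.false_eq_true, if_false]
        rw [if_neg (fun h => h.2 rfl)]
      have hB : bSplitStep C (AC, a) (c, t)
          = ((if t == "Begin" || t == "End" then AC ++ [[t]] else AC), a) := by
        unfold bSplitStep
        simp only [hbeq, Bool.false_eq_true, if_false]
      rw [hA, hB]
      rw [ih (c + 1) _ _ ha (by omega)]
      simp only [List.length_cons]
      push_cast
      ring_nf

lemma pv_split_eq (C : List String) :
    ((PySem.List.enumerate C 0).foldl (bSplitStep C) ([], 1)).1 = pvParse C := by
  unfold pvParse
  rw [pv_split_inv C C 0 [] 1 (le_refl _) (le_refl _)]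

-- --- bridging B's classification pass to A's two staged passes ---

-- A's phase 2 result, zipped, is the filterMap of the guard over the indexed blocks
lemma pv_phase2_zip :
    ∀ (l : List (List String)) (c : Nat) (LO : List (List String)) (LPos : List Int),
      LO.length = LPos.length →
      (l.foldl pvPhase2Step (LO, LPos, (c : Int))).1.zip
          (l.foldl pvPhase2Step (LO, LPos, (c : Int))).2.1
        = LO.zip LPos ++ (PySem.List.enumerate l (c : Int)).filterMap pvGuard := by
  intro l
  induction l with
  | nil =>
    intro c LO LPos _
    simp [PySem.List.enumerate]
  | cons b r ih =>
    intro c LO LPos hlen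
    have hc1 : ((c : Int)) + 1 = (((c + 1 : Nat)) : Int) := by push_cast; ring
    rw [PySem.List.enumerate_cons]
    simp only [List.foldl_cons, List.filterMap_cons]
    by_cases hg : (b.contains "=" && decide (b.length < 5)) = true
    · have hstep : pvPhase2Step (LO, LPos, (c : Int)) b
          = (LO ++ [PySem.List.slice b (some 0) (some ((b.length : Int) - 1))],
             LPos ++ [(c : Int)], (c : Int) + 1) := by
        unfold pvPhase2Step; rw [if_pos hg]
      have hguard : pvGuard ((c : Int), b)
          = some (PySem.List.slice b (some 0) (some ((b.length : Int) - 1)), (c : Int)) := by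
        unfold pvGuard; rw [if_pos hg]
      rw [hstep, hguard, hc1, ih (c + 1) _ _ (by simp [hlen])]
      rw [List.zip_append hlen]
      simp
    · have hstep : pvPhase2Step (LO, LPos, (c : Int)) b = (LO, LPos, (c : Int) + 1) := by
        unfold pvPhase2Step; rw [if_neg hg]
      have hguard : pvGuard ((c : Int), b) = none := by
        unfold pvGuard; rw [if_neg hg]
      rw [hstep, hguard, hc1, ih (c + 1) _ _ hlen]

lemma pv_len4 (l : List String) (h : l.length = 4) : ∃ a b c d, l = [a, b, c, d] := by
  match l, h with
  | [a, b, c, d], _ => exact ⟨a, b, c, d, rfl⟩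

-- fusion: B's one classification pass computes A's classify-fold over the filtered list,
-- through the quadruple-to-(consts, triples) packaging
lemma pv_fusion :
    ∀ (l : List (Int × List String)) (st : List String × List String × List String × List Int),
      st.2.1.length = st.2.2.1.length → st.2.1.length = st.2.2.2.length →
      (∀ p ∈ l, (p.2.contains "=" && decide (p.2.length < 5)) = true → p.2.length = 4) →
      l.foldl bClassifyStep (st.1, st.2.2.2.zip (st.2.1.zip st.2.2.1))
        = (((l.filterMap pvGuard).foldl pvClassifyStep st).1,
           ((l.filterMap pvGuard).foldl pvClassifyStep st).2.2.2.zip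
             (((l.filterMap pvGuard).foldl pvClassifyStep st).2.1.zip
              ((l.filterMap pvGuard).foldl pvClassifyStep st).2.2.1)) := by
  intro l
  induction l with
  | nil => intro st _ _ _; simp
  | cons p r ih =>
    intro st h1 h2 hall
    obtain ⟨q, blk⟩ := p
    simp only [List.foldl_cons, List.filterMap_cons]
    by_cases hg : (blk.contains "=" && decide (blk.length < 5)) = true
    · have h4 := hall (q, blk) List.mem_cons_self hg
      obtain ⟨a, b, cc, d, rfl⟩ := pv_len4 blk h4
      have hguard : pvGuard (q, [a, b, cc, d]) = some ([a, b, cc], q) := by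
        unfold pvGuard; rw [if_pos hg]; rfl
      have hB : bClassifyStep (st.1, st.2.2.2.zip (st.2.1.zip st.2.2.1)) (q, [a, b, cc, d])
          = (if pvIsFloat cc then
               if !(st.1.contains a) then
                 (st.1 ++ [a], st.2.2.2.zip (st.2.1.zip st.2.2.1))
               else (st.1, st.2.2.2.zip (st.2.1.zip st.2.2.1))
             else (st.1, st.2.2.2.zip (st.2.1.zip st.2.2.1) ++ [(q, a, cc)])) := by
        unfold bClassifyStep
        rw [if_pos hg]
        rfl
      have hA : pvClassifyStep st ([a, b, cc], q)
          = (if pvIsFloat cc then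
               if !(st.1.contains a) then (st.1 ++ [a], st.2.1, st.2.2.1, st.2.2.2)
               else st
             else (st.1, st.2.1 ++ [a], st.2.2.1 ++ [cc], st.2.2.2 ++ [q])) := by
        unfold pvClassifyStep
        rfl
      rw [hguard]
      simp only [List.foldl_cons]
      rw [hB, hA]
      by_cases hf : pvIsFloat cc = true
      · rw [if_pos hf, if_pos hf]
        by_cases hm : (!(st.1.contains a)) = true
        · rw [if_pos hm, if_pos hm]
          exact ih (st.1 ++ [a], st.2.1, st.2.2.1, st.2.2.2) h1 h2
            (fun x hx => hall x (List.mem_cons_of_mem _ hx))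
        · rw [if_neg hm, if_neg hm]
          exact ih st h1 h2 (fun x hx => hall x (List.mem_cons_of_mem _ hx))
      · rw [if_neg hf, if_neg hf]
        have hz : (st.2.2.2 ++ [q]).zip ((st.2.1 ++ [a]).zip (st.2.2.1 ++ [cc]))
            = st.2.2.2.zip (st.2.1.zip st.2.2.1) ++ [(q, a, cc)] := by
          rw [List.zip_append h1, List.zip_append]
          · rfl
          · simp [List.length_zip]
            omega
        rw [← hz]
        exact ih (st.1, st.2.1 ++ [a], st.2.2.1 ++ [cc], st.2.2.2 ++ [q])
          (by simp [h1]) (by simp [h2]) (fun x hx => hall x (List.mem_cons_of_mem _ hx))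
    · have hguard : pvGuard (q, blk) = none := by unfold pvGuard; rw [if_neg hg]
      have hB : bClassifyStep (st.1, st.2.2.2.zip (st.2.1.zip st.2.2.1)) (q, blk)
          = (st.1, st.2.2.2.zip (st.2.1.zip st.2.2.1)) := by
        unfold bClassifyStep; rw [if_neg hg]
      rw [hguard, hB]
      exact ih st h1 h2 (fun x hx => hall x (List.mem_cons_of_mem _ hx))

-- --- bridging B's substitution guard and final pass to the shared normal form ---

lemma pv_substTokB_eq (L_V : List String) (p q : Int) (v w : String) (y : Nat) (tok : String) :
    bSubstTok L_V p q v w (y : Int) tok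
      = if q < p then pvSubstTok L_V v w y tok else tok := by
  unfold bSubstTok pvSubstTok
  have hy : (decide (1 < ((y : Nat) : Int))) = decide (1 < y) := by simp
  by_cases hq : q < p
  · rw [if_pos hq]
    simp only [hq, decide_true, Bool.true_and, hy]
    by_cases hA : (decide (1 < y) && (tok != ";") && !(pvOps.contains tok)
        && !(L_V.contains tok)) = true
    · by_cases he : tok = v
      · subst he
        rw [if_pos (by rw [Bool.and_eq_true]; exact ⟨hA, by simp⟩), if_pos hA]
        simp
      · rw [if_neg (by rw [Bool.and_eq_true]; rintro ⟨-, hvv⟩; exact he (by simpa using hvv)),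
            if_pos hA, if_neg (by intro h; exact he (beq_iff_eq.mp h).symm)]
    · rw [if_neg (by rw [Bool.and_eq_true]; exact fun h => hA h.1), if_neg hA]
  · rw [if_neg hq]
    simp only [hq, decide_false, Bool.false_and, Bool.false_eq_true, if_false]

lemma pv_elim_enum (L_P : List Int) (AC : List (List String)) :
    (PySem.List.pyRange 0 (AC.length : Int) 1).foldl (fun out i =>
        if !(L_P.contains i) then out ++ [PySem.List.pyGetD AC i []] else out)
      ([] : List (List String))
    = (PySem.List.enumerate AC 0).foldl (fun out p =>
        if !(L_P.contains p.1) then out ++ [p.2] else out) [] := by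
  rw [PySem.List.enumerate_eq_map_pyRange AC [], List.foldl_map]
  simp [PySem.List.len_eq]

lemma pv_inner (L_V : List String) (subs : List (Int × String × String)) (k : Int)
    (blk : List String) :
    (PySem.List.enumerate blk 0).foldl (fun new yt =>
        new ++ [subs.foldl (fun tok s =>
          bSubstTok L_V k s.1 s.2.1 s.2.2 yt.1 tok) yt.2]) []
      = pvFinal L_V subs k blk := by
  rw [PySem.List.foldl_append_singleton_eq_map
    (fun yt => subs.foldl (fun tok s => bSubstTok L_V k s.1 s.2.1 s.2.2 yt.1 tok) yt.2)
    (PySem.List.enumerate blk 0) []]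
  rw [PySem.List.enumerate_eq_zipIdx_map, List.map_map, pvFinal, List.mapIdx_eq_zipIdx_map]
  simp only [List.nil_append]
  apply List.map_congr_left
  intro p _
  simp only [Function.comp_apply, zero_add]
  apply PySem.List.foldl_congr_mem
  intro t s _
  exact pv_substTokB_eq L_V k s.1 s.2.1 s.2.2 p.2 t

lemma pv_A_final (L_V Var V_C : List String) (L_P : List Int) (ALL : List (List String))
    (h1 : Var.length = V_C.length) (h2 : Var.length = L_P.length)
    (hb : ∀ s ∈ L_P.zip (Var.zip V_C), 0 ≤ s.1 ∧ s.1 < (ALL.length : Int)) :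
    (PySem.List.pyRange 0
        ((((PySem.List.pyRange 0 (L_P.length : Int) 1).foldl
            (pvA4Step L_V Var V_C L_P) ALL).length : Int)) 1).foldl (fun out i =>
        if !(L_P.contains i) then
          out ++ [PySem.List.pyGetD
            ((PySem.List.pyRange 0 (L_P.length : Int) 1).foldl
              (pvA4Step L_V Var V_C L_P) ALL) i []]
        else out) []
      = ALL.zipIdx.foldl (fun out p =>
          if !(L_P.contains ((p.2 : Int))) then
            out ++ [pvFinal L_V (L_P.zip (Var.zip V_C)) ((p.2 : Int)) p.1]
          else out) [] := by
  have hconv : (PySem.List.pyRange 0 (L_P.length : Int) 1).foldl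
      (pvA4Step L_V Var V_C L_P) ALL = (L_P.zip (Var.zip V_C)).foldl (pvA4Core L_V) ALL := by
    have hvz : (Var.zip V_C).length = Var.length := by simp [List.length_zip, h1]
    have hzl : (L_P.zip (Var.zip V_C)).length = L_P.length := by
      simp [List.length_zip, hvz, h2]
    have hbound : ((L_P.length : Int)) = (((L_P.zip (Var.zip V_C)).length : Int)) := by rw [hzl]
    rw [hbound]
    rw [PySem.List.foldl_congr_mem _ _
      (fun AC c => pvA4Core L_V AC (PySem.List.pyGetD (L_P.zip (Var.zip V_C)) c (0, "", ""))) ALL ?_]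
    · exact PySem.List.foldl_pyRange_zero_pyGetD' (L_P.zip (Var.zip V_C)) (0, "", "")
        (pvA4Core L_V) ALL
    · intro AC c hc
      have hc' := PySem.List.mem_pyRange_one.mp hc
      have hc0 : 0 ≤ c := hc'.1
      have hc1 : c < (L_P.length : Int) := by rw [← hbound] at hc'; exact hc'.2
      obtain ⟨hzp, hzvc⟩ := pv_getD_zip L_P (Var.zip V_C) c 0 ("", "")
        (by rw [hvz, h2]) hc0 hc1
      obtain ⟨hzv, hzc⟩ := pv_getD_zip Var V_C c "" "" h1 hc0 (by omega)
      unfold pvA4Step pvA4Core pvRw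
      rw [hzp, hzv, hzc, hzvc]
  rw [hconv]
  rw [pv_A4_fold L_V ALL.length (L_P.zip (Var.zip V_C)) ALL rfl hb]
  rw [pv_elim_enum]
  rw [PySem.List.enumerate_eq_zipIdx_map, pv_zipIdx_mapIdx, List.map_map, List.foldl_map]
  apply PySem.List.foldl_congr_mem
  intro out p _
  simp only [Function.comp_apply, zero_add]

lemma pv_contains_ofList {α : Type} [BEq α] [LawfulBEq α] (xs : List α) (v : α) :
    PySem.Set.contains (PySem.Set.ofList xs) v = xs.contains v := by
  simp [PySem.Set.contains, PySem.Set.mem_ofList]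

lemma pv_B_final (L_V : List String) (copies : List (Int × String × String))
    (L_P : List Int) (hLP : copies.map (·.1) = L_P) (ALL : List (List String)) :
    (PySem.List.enumerate ALL 0).foldl (fun result pb =>
        if PySem.Set.contains (PySem.Set.ofList (copies.map (·.1))) pb.1 then result
        else result ++ [(PySem.List.enumerate pb.2 0).foldl (fun new yt =>
          new ++ [copies.foldl (fun tok s =>
            bSubstTok L_V pb.1 s.1 s.2.1 s.2.2 yt.1 tok) yt.2]) []]) []
      = ALL.zipIdx.foldl (fun out p =>
          if !(L_P.contains ((p.2 : Int))) then
            out ++ [pvFinal L_V copies ((p.2 : Int)) p.1]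
          else out) [] := by
  rw [PySem.List.enumerate_eq_zipIdx_map, List.foldl_map]
  apply PySem.List.foldl_congr_mem
  intro out p _
  simp only [zero_add]
  rw [pv_inner, pv_contains_ofList, hLP]
  cases hc : L_P.contains ((p.2 : Int))
  · rw [if_neg (by simp), if_pos (by simp)]
  · rw [if_pos rfl, if_neg (by simp)]

lemma pv_main (C : List String) (hpre : Pre_Eliminacion_de_Copeas C) :
    Eliminacion_de_Copeas C = Eliminacion_de_Copeas_alt C := by
  dsimp only [Eliminacion_de_Copeas, Eliminacion_de_Copeas_alt]
  rw [pv_split_eq C]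
  rw [pv_phase3_eq _ _ (pv_LO_len C hpre) (pv_phase2_len (pvParse C))]
  set Q := ((pvPhase2 (pvParse C)).1.zip (pvPhase2 (pvParse C)).2).foldl pvClassifyStep
    ([], [], [], []) with hQ
  have hinv := pv_classify_inv ((pvPhase2 (pvParse C)).1.zip (pvPhase2 (pvParse C)).2)
    ([], [], [], []) rfl rfl
  rw [← hQ] at hinv
  have h1 : Q.2.1.length = Q.2.2.1.length := hinv.1.1
  have h2 : Q.2.1.length = Q.2.2.2.length := hinv.1.2
  -- B's classification pass computes (Q.1, zip of the three copy lists)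
  have hzfm : (pvPhase2 (pvParse C)).1.zip (pvPhase2 (pvParse C)).2
      = (PySem.List.enumerate (pvParse C) 0).filterMap pvGuard := by
    have := pv_phase2_zip (pvParse C) 0 [] [] rfl
    simpa [pvPhase2] using this
  have hall : ∀ p ∈ PySem.List.enumerate (pvParse C) 0,
      (p.2.contains "=" && decide (p.2.length < 5)) = true → p.2.length = 4 := by
    intro p hp hg
    obtain ⟨k, hk, rfl⟩ := (PySem.List.mem_enumerate_iff _ _ _).mp hp
    exact pv_blk_len4 C hpre _ (List.getElem_mem hk) hg
  have hfus : (PySem.List.enumerate (pvParse C) 0).foldl bClassifyStep ([], [])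
      = (Q.1, Q.2.2.2.zip (Q.2.1.zip Q.2.2.1)) := by
    have := pv_fusion (PySem.List.enumerate (pvParse C) 0) ([], [], [], []) rfl rfl hall
    rw [← hzfm] at this
    simpa [← hQ] using this
  rw [hfus]
  -- bounds for the copy positions
  have hb : ∀ s ∈ Q.2.2.2.zip (Q.2.1.zip Q.2.2.1),
      0 ≤ s.1 ∧ s.1 < ((pvParse C).length : Int) := by
    intro s hs
    have hsp := (List.of_mem_zip (a := s.1) (b := s.2) (by simpa using hs)).1
    rcases hinv.2 s.1 hsp with h | h
    · simp at h
    · rcases List.mem_map.mp h with ⟨pr, hpr, hpr2⟩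
      have hm2 := (List.of_mem_zip (a := pr.1) (b := pr.2) (by simpa using hpr)).2
      rw [← hpr2]
      exact pv_LPos_bounds (pvParse C) _ hm2
  have hLP : (Q.2.2.2.zip (Q.2.1.zip Q.2.2.1)).map (·.1) = Q.2.2.2 := by
    apply List.map_fst_zip
    simp [List.length_zip]
    omega
  rw [pv_A_final Q.1 Q.2.1 Q.2.2.1 Q.2.2.2 (pvParse C) h1 h2 hb]
  rw [pv_B_final Q.1 (Q.2.2.2.zip (Q.2.1.zip Q.2.2.1)) Q.2.2.2 hLP (pvParse C)]

-- ===== VERDICT (by name: the statement is the Claim_ definition above) =====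
theorem Eliminacion_de_Copeas_spec : Claim_equal_Eliminacion_de_Copeas := by
  intro Codigo _hdom hpre
  unfold Spec_Eliminacion_de_Copeas
  exact pv_main Codigo hpre
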